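-- pv_equiv track=rewrite | github.com/nna99d/do_an | subscriber.py | dnaTransform
-- ===== SOURCE A (Python) =====
-- def toDNA(v):
--     return "ACGT"[v & 3]
--
-- def fromDNA(c):
--     return {"A":0,"C":1,"G":2,"T":3}[c]
--
-- def dnaTransform(b, k):
--     dna = [toDNA((b >> (2*i)) & 3) for i in range(4)]
--     mode = k & 3
--     if mode == 1: # complement
--         dna = [{"A":"T","T":"A","C":"G","G":"C"}[c] for c in dna]
--     elif mode == 2: # reverse
--         dna = dna[::-1]
--     elif mode == 3: # swap pairs
--         dna = [dna[1],dna[0],dna[3],dna[2]]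
--     out=0
--     for i in range(4):
--         out |= (fromDNA(dna[i]) << (2*i))
--     return out
-- ===== SOURCE B (Python) =====
-- def dnaTransform(b, k):
--     x = b & 0xFF
--     m = k & 3
--     if m == 0:
--         return x
--     if m == 1:  # per-base complement is XOR with 3 in every 2-bit field
--         return x ^ 0xFF
--     if m == 2:  # reverse the four 2-bit fields
--         return ((x >> 6) & 3) | (((x >> 4) & 3) << 2) | (((x >> 2) & 3) << 4) | ((x & 3) << 6)
--     # m == 3: swap adjacent 2-bit fields within each nibble
--     return ((x >> 2) & 3) | ((x & 3) << 2) | (((x >> 6) & 3) << 4) | (((x >> 4) & 3) << 6)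
-- ===== Notes on version B (the rewrite author's own statement) =====
-- stated objective: simpler
-- what changed: B drops the DNA string/dict encode-decode machinery entirely and computes each mode with direct bit arithmetic on b & 0xFF (identity, XOR 0xFF, field reversal, nibble-internal field swap).
import Mathlib
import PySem

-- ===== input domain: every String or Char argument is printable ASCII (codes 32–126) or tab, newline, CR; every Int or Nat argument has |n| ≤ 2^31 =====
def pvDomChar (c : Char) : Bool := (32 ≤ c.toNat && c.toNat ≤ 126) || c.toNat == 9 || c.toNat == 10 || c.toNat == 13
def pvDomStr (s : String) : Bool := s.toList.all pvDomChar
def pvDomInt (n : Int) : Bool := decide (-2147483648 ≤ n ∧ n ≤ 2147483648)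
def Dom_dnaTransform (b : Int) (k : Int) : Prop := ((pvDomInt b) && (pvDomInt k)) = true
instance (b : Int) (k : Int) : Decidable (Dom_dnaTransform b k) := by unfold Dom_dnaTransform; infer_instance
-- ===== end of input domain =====

-- B replaces A's DNA string/dict encode-transform-decode machinery by direct bit
-- arithmetic on b & 0xFF (objective: simpler).

-- ===== PORT A =====
-- "ACGT"[v & 3]; v & 3 ∈ [0,4) so the index is always in range (getD default never used)
def toDNA (v : Int) : Char := (PySem.Str.pyGet? "ACGT" (PySem.Int.band v 3)).getD ' '

-- dict lookup {"A":0,"C":1,"G":2,"T":3}[c]; KeyError impossible on toDNA's outputs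
def fromDNA (c : Char) : Int :=
  (PySem.Dict.get? (PySem.Dict.mk [('A', (0:Int)), ('C', 1), ('G', 2), ('T', 3)]) c).getD 0

def dnaTransform (b : Int) (k : Int) : Int :=
  -- i ranges over 0..3, so (2*i).toNat is exactly Python's nonnegative shift amount
  let dna := (PySem.List.pyRange 0 4 1).map (fun i => toDNA (PySem.Int.band (b >>> (2*i).toNat) 3))
  let mode := PySem.Int.band k 3
  let dna :=
    if mode = 1 then
      -- complement dict lookup; KeyError impossible (dna holds only A/C/G/T)
      dna.map (fun c => (PySem.Dict.get? (PySem.Dict.mk [('A','T'),('T','A'),('C','G'),('G','C')]) c).getD ' ')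
    else if mode = 2 then (PySem.List.slice? dna none none (-1)).getD []  -- dna[::-1]
    else if mode = 3 then
      -- dna[1],dna[0],dna[3],dna[2]: indices always in range on a 4-list
      [PySem.List.pyGetD dna 1 ' ', PySem.List.pyGetD dna 0 ' ',
       PySem.List.pyGetD dna 3 ' ', PySem.List.pyGetD dna 2 ' ']
    else dna
  (PySem.List.pyRange 0 4 1).foldl
    (fun out i => PySem.Int.bor out (fromDNA (PySem.List.pyGetD dna i ' ') <<< (2*i).toNat)) 0

-- ===== PORT B =====
def dnaTransform_alt (b : Int) (k : Int) : Int :=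
  let x := PySem.Int.band b 255
  let m := PySem.Int.band k 3
  if m = 0 then x
  else if m = 1 then PySem.Int.bxor x 255
  else if m = 2 then
    PySem.Int.bor (PySem.Int.bor (PySem.Int.band (x >>> 6) 3) ((PySem.Int.band (x >>> 4) 3) <<< 2))
      (PySem.Int.bor ((PySem.Int.band (x >>> 2) 3) <<< 4) ((PySem.Int.band x 3) <<< 6))
  else
    PySem.Int.bor (PySem.Int.bor (PySem.Int.band (x >>> 2) 3) ((PySem.Int.band x 3) <<< 2))
      (PySem.Int.bor ((PySem.Int.band (x >>> 6) 3) <<< 4) ((PySem.Int.band (x >>> 4) 3) <<< 6))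

-- ===== PRECONDITION & SPEC =====
def Spec_dnaTransform (b : Int) (k : Int) (out : Int) : Prop := out = dnaTransform_alt b k
instance (b : Int) (k : Int) (out : Int) : Decidable (Spec_dnaTransform b k out) := by unfold Spec_dnaTransform; infer_instance

-- ===== CLAIM (what is proved, stated in full; the proofs are below) =====
def Claim_equal_dnaTransform : Prop := ∀ (b : Int) (k : Int), Dom_dnaTransform b k → Spec_dnaTransform b k (dnaTransform b k)

-- ===== LEMMAS AND PROOFS =====

-- a & 3 and a & 255 are the low bits, i.e. mod by 4 resp. 256 (Python two's-complement band)
theorem nat_and3 (n : Nat) : n &&& 3 = n % 4 := by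
  have := Nat.and_two_pow_sub_one_eq_mod n 2; norm_num at this; exact this

theorem nat_and255 (n : Nat) : n &&& 255 = n % 256 := by
  have := Nat.and_two_pow_sub_one_eq_mod n 8; norm_num at this; exact this

theorem band3_eq_emod (a : Int) : PySem.Int.band a 3 = a % 4 := by
  unfold PySem.Int.band
  split_ifs with h1 h2 h2 <;> [skip; omega; skip; omega]
  · rw [show Int.toNat 3 = 3 from rfl, nat_and3]; omega
  · rw [show Int.toNat 3 = 3 from rfl, Nat.and_comm, nat_and3]; omega

theorem band255_eq_emod (a : Int) : PySem.Int.band a 255 = a % 256 := by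
  unfold PySem.Int.band
  split_ifs with h1 h2 h2 <;> [skip; omega; skip; omega]
  · rw [show Int.toNat 255 = 255 from rfl, nat_and255]; omega
  · rw [show Int.toNat 255 = 255 from rfl, Nat.and_comm, nat_and255]; omega

-- a Python shift amount written as an Int cast is the Nat shift
theorem shiftR_cast (b : Int) (n : Nat) : b >>> ((n : Int)) = b >>> n := by
  cases b <;> cases n <;> rfl

-- (b >> n) & 3 for n <= 6 only reads the low byte
theorem shift_band_reduce (b : Int) (n : Nat) (hn : n ≤ 6) :
    PySem.Int.band (b >>> ((n : Int))) 3 = PySem.Int.band ((b % 256) >>> ((n : Int))) 3 := by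
  rw [shiftR_cast, shiftR_cast, band3_eq_emod, band3_eq_emod,
    Int.shiftRight_eq_div_pow, Int.shiftRight_eq_div_pow]
  interval_cases n <;> norm_num <;> omega

theorem bandk_reduce (k : Int) : PySem.Int.band k 3 = PySem.Int.band (k % 4) 3 := by
  rw [band3_eq_emod, band3_eq_emod]; omega

theorem dnaTransform_reduce (b k : Int) :
    dnaTransform b k = dnaTransform (b % 256) (k % 4) := by
  have h0 := shift_band_reduce b 0 (by omega)
  have h2 := shift_band_reduce b 2 (by omega)
  have h4 := shift_band_reduce b 4 (by omega)
  have h6 := shift_band_reduce b 6 (by omega)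
  have hpr : PySem.List.pyRange 0 4 1 = [0, 1, 2, 3] := by decide
  have e0 : ((2:Int)*0).toNat = 0 := rfl
  have e1 : ((2:Int)*1).toNat = 2 := rfl
  have e2 : ((2:Int)*2).toNat = 4 := rfl
  have e3 : ((2:Int)*3).toNat = 6 := rfl
  simp only [dnaTransform, hpr, List.map_cons, List.map_nil, List.foldl_cons, List.foldl_nil,
    e0, e1, e2, e3, h0, h2, h4, h6, bandk_reduce k]

theorem dnaTransform_alt_reduce (b k : Int) :
    dnaTransform_alt b k = dnaTransform_alt (b % 256) (k % 4) := by
  have hb : PySem.Int.band b 255 = PySem.Int.band (b % 256) 255 := by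
    rw [band255_eq_emod, band255_eq_emod]; omega
  simp only [dnaTransform_alt, hb, bandk_reduce k]

set_option maxRecDepth 40000 in
theorem agree_small :
    ∀ r ∈ PySem.List.pyRange 0 256 1, ∀ s ∈ PySem.List.pyRange 0 4 1,
      dnaTransform r s = dnaTransform_alt r s := by decide

-- ===== VERDICT (by name: the statement is the Claim_ definition above) =====
theorem dnaTransform_spec : Claim_equal_dnaTransform := by
  intro b k _
  unfold Spec_dnaTransform
  rw [dnaTransform_reduce, dnaTransform_alt_reduce]
  exact agree_small _ ((PySem.List.mem_pyRange_one).2 ⟨Int.emod_nonneg b (by omega), Int.emod_lt_of_pos b (by omega)⟩)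
    _ ((PySem.List.mem_pyRange_one).2 ⟨Int.emod_nonneg k (by omega), Int.emod_lt_of_pos k (by omega)⟩)
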